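-- pv_equiv track=rewrite | github.com/SVCE-ACM/A-December-of-Algorithms-2019 | December-16/python_UjjwalPrahladka_Dec16.py | check_for_validity
-- ===== SOURCE A (Python) =====
-- def check_for_validity(hand):
--     suits = ['s','c','d','h']
--     values = ['a'] + [str(i) for i in range(2,11)] + ['j','q','k']
--     deck = []
--     #building a deck
--     for value in values:
--         for suit in suits:
--             deck.append(value + suit)
--     try:
--         if len(hand) != 5:
--             raise
--         for card in hand:
--             #popping cards out of the deck
--             deck.remove(card)
--     except:
--         #exception will be raised if two or more same cards are present
--         return False
--     else:
--         return True
-- ===== SOURCE B (Python) =====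
-- _VALID = {v + s
--           for v in ['a'] + [str(i) for i in range(2, 11)] + ['j', 'q', 'k']
--           for s in ['s', 'c', 'd', 'h']}
--
--
-- def check_for_validity(hand):
--     return len(hand) == 5 and len(set(hand)) == 5 and all(c in _VALID for c in hand)
-- ===== Notes on version B (the rewrite author's own statement) =====
-- stated objective: simpler
-- what changed: Replaces the deck-consuming remove loop (with a try/except driving control flow) by independent membership tests against a precomputed set of the 52 legal cards plus a set-cardinality uniqueness check.
import Mathlib
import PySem

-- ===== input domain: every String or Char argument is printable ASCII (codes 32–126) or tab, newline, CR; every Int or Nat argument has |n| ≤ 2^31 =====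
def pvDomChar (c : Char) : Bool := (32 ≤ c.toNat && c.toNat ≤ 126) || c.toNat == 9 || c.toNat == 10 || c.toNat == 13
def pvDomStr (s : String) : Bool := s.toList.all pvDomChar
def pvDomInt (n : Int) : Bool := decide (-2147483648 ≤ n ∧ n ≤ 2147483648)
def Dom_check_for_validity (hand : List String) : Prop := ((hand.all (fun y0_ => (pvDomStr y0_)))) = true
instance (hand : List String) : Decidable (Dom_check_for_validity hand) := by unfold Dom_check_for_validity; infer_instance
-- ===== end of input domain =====

-- B replaces A's deck-consuming remove loop by membership tests against a set of the 52 legal cards plus a set-cardinality uniqueness check (simpler).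

-- ===== PORT A =====
-- A-side helpers: the deck built exactly as A builds it
def pvSuits : List String := ["s", "c", "d", "h"]
def pvValues : List String :=
  ["a"] ++ (PySem.List.pyRange 2 11 1).map PySem.Int.toStr ++ ["j", "q", "k"]
def pvDeck : List String :=
  pvValues.foldl (fun deck value =>
    pvSuits.foldl (fun deck suit => deck ++ [value ++ suit]) deck) []

def check_for_validity (hand : List String) : Bool :=
  if hand.length ≠ 5 then false
  else
    -- the for-loop popping cards; none = some remove raised ValueError (caught → False)
    match hand.foldl (fun od card => od.bind (fun d => PySem.List.remove? d card)) (some pvDeck) with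
    | some _ => true
    | none => false

-- ===== PORT B =====
-- B-side helper: the set comprehension building the 52 legal card strings
def pvValidAlt : PySem.Set String :=
  PySem.Set.ofList
    ((["a"] ++ (PySem.List.pyRange 2 11 1).map PySem.Int.toStr ++ ["j", "q", "k"]).flatMap
      (fun v => (["s", "c", "d", "h"]).map (fun s => v ++ s)))

def check_for_validity_alt (hand : List String) : Bool :=
  decide (hand.length = 5) &&
    decide ((PySem.Set.ofList hand).length = 5) &&
    hand.all (fun c => PySem.Set.contains pvValidAlt c)

-- ===== PRECONDITION & SPEC =====
def Spec_check_for_validity (hand : List String) (out : Bool) : Prop := out = check_for_validity_alt hand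
instance (hand : List String) (out : Bool) : Decidable (Spec_check_for_validity hand out) := by unfold Spec_check_for_validity; infer_instance

-- ===== CLAIM (what is proved, stated in full; the proofs are below) =====
def Claim_equal_check_for_validity : Prop := ∀ (hand : List String), Dom_check_for_validity hand → Spec_check_for_validity hand (check_for_validity hand)

-- ===== LEMMAS AND PROOFS =====

-- A's two nested append loops build the flat cross product
theorem pvDeck_eq : pvDeck = pvValues.flatMap (fun v => pvSuits.map (fun s => v ++ s)) := by
  unfold pvDeck
  simp only [PySem.List.foldl_append_singleton_eq_map, PySem.List.foldl_append_eq_flatMap]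
  simp

-- B's set is built from the same 52 strings
theorem pvValidAlt_eq : pvValidAlt = PySem.Set.ofList (pvValues.flatMap (fun v => pvSuits.map (fun s => v ++ s))) := rfl

set_option maxRecDepth 10000 in
theorem pvDeck_nodup : pvDeck.Nodup := by decide

-- the fold over `none` stays `none`
theorem pvFold_none (hand : List String) :
    hand.foldl (fun od card => od.bind (fun d => PySem.List.remove? d card)) none = none := by
  induction hand with
  | nil => rfl
  | cons c t ih => simpa using ih

-- the remove loop over a duplicate-free deck succeeds iff the hand is duplicate-free and ⊆ deck
theorem pvFold_isSome (hand : List String) (d : List String) (hd : d.Nodup) :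
    (hand.foldl (fun od card => od.bind (fun l => PySem.List.remove? l card)) (some d)).isSome
      = (decide hand.Nodup && hand.all (fun c => decide (c ∈ d))) := by
  induction hand generalizing d with
  | nil => simp
  | cons c t ih =>
    by_cases hc : c ∈ d
    · rw [List.foldl_cons]
      simp only [Option.bind_some, PySem.List.remove?_eq_some_erase d c hc]
      rw [ih (d.erase c) (hd.erase c), Bool.eq_iff_iff]
      simp only [Bool.and_eq_true, decide_eq_true_eq, List.all_eq_true, List.nodup_cons, List.forall_mem_cons,
        List.Nodup.mem_erase_iff hd]
      constructor
      · rintro ⟨hn, hall⟩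
        exact ⟨⟨fun hctm => (hall c hctm).1 rfl, hn⟩, hc, fun x hx => (hall x hx).2⟩
      · rintro ⟨⟨hct, hn⟩, _, hall⟩
        exact ⟨hn, fun x hx => ⟨fun h => hct (h ▸ hx), hall x hx⟩⟩
    · rw [List.foldl_cons]
      rw [Option.bind_some, (PySem.List.remove?_eq_none_iff d c).mpr hc, pvFold_none]
      simp [hc]

-- cardinality of set(xs) equals len(xs) iff xs has no duplicates
theorem pvOfList_length_eq_iff (xs : List String) :
    (PySem.Set.ofList xs).length = xs.length ↔ xs.Nodup := by
  constructor
  · intro h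
    by_contra hnd
    suffices hlt : (PySem.Set.ofList xs).length < xs.length by omega
    clear h
    induction xs with
    | nil => exact absurd List.nodup_nil hnd
    | cons x t ih =>
      rw [PySem.Set.ofList_cons]
      have hfil : ((PySem.Set.ofList t).discard x).length ≤ (PySem.Set.ofList t).length :=
        List.length_filter_le _ _
      rw [List.nodup_cons, not_and_or] at hnd
      rcases hnd with hx | hnt
      · rw [not_not] at hx
        have hx' : x ∈ PySem.Set.ofList t := (PySem.Set.mem_ofList t x).mpr hx
        have : ((PySem.Set.ofList t).discard x).length < (PySem.Set.ofList t).length := by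
          refine List.length_filter_lt_length_iff_exists.mpr ?_
          exact ⟨x, hx', by simp⟩
        have := PySem.Set.length_ofList_le t
        simp only [List.length_cons]
        omega
      · have := ih hnt
        simp only [List.length_cons]
        omega
  · intro h; rw [PySem.Set.ofList_eq_self_of_nodup xs h]

-- B's membership test agrees with membership in A's deck
theorem pvValid_mem (c : String) : PySem.Set.contains pvValidAlt c = decide (c ∈ pvDeck) := by
  rw [Bool.eq_iff_iff]
  simp [pvValidAlt_eq, PySem.Set.mem_ofList, pvDeck_eq]

-- ===== VERDICT (by name: the statement is the Claim_ definition above) =====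
theorem check_for_validity_spec : Claim_equal_check_for_validity := by
  intro hand _
  unfold Spec_check_for_validity check_for_validity check_for_validity_alt
  by_cases h5 : hand.length = 5
  · simp only [h5, ne_eq, not_true_eq_false, if_false]
    have hmatch : ∀ o : Option (List String),
        (match o with | some _ => true | none => false) = o.isSome := by
      intro o; cases o <;> rfl
    rw [hmatch, pvFold_isSome hand pvDeck pvDeck_nodup]
    have hcard : decide ((PySem.Set.ofList hand).length = 5) = decide hand.Nodup := by
      apply decide_eq_decide.mpr
      rw [← h5]; exact pvOfList_length_eq_iff hand
    have hall : (hand.all (fun c => PySem.Set.contains pvValidAlt c))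
        = hand.all (fun c => decide (c ∈ pvDeck)) := by
      simp only [pvValid_mem]
    rw [hcard, hall]
    simp
  · simp [h5]
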